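-- pv_equiv track=rewrite | github.com/yearing1017/Algorithm_Note | 程序员代码面试指南-左程云/其他题目/qssz.py | solve
-- ===== SOURCE A (Python) =====
-- def solve(a ):
--     l = 0
--     r = len(a) - 1
--     while l<=r:
--         mid = (l+r) // 2
--         # 索引值==数值，说明左半区正确
--         if a[mid] == mid:
--             l = mid + 1
--         else:
--             r = mid - 1
--     return l
-- ===== SOURCE B (Python) =====
-- def solve(a):
--     def go(l, n):
--         # search window is the n indices l, l+1, ..., l+n-1
--         if n == 0:
--             return l
--         k = (n - 1) // 2
--         mid = l + k
--         if a[mid] == mid: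
--             return go(mid + 1, n - 1 - k)
--         return go(l, k)
--     return go(0, len(a))
-- ===== Notes on version B (the rewrite author's own statement) =====
-- stated objective: alternative
-- what changed: The interval is represented as a base index plus a remaining count instead of two endpoints: a recursive helper go(l, n) recurses on the count with offset arithmetic k = (n-1)//2, mid = l + k, replacing A's while loop over mutable endpoints l, r with mid = (l+r)//2; the probed indices coincide, so the results agree on arbitrary arrays.
import Mathlib
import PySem

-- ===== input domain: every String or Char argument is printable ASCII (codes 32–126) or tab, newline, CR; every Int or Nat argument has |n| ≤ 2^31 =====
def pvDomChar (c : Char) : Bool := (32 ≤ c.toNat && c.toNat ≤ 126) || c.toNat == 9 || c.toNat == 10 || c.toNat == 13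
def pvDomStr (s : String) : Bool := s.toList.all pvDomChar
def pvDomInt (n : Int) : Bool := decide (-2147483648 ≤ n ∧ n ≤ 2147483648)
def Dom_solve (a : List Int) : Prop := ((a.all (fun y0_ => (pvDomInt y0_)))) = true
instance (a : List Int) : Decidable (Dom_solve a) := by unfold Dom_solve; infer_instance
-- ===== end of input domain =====

-- B represents the search window as base index + remaining count (recursion on the count) instead of A's while loop over two mutable endpoints (objective: alternative).


-- ===== PORT A =====
-- A's while loop over mutable endpoints l, r; a[mid] is read with pyGet? (the index is
-- always in range while 0 ≤ l ≤ r ≤ len-1, so the none branch is unreachable on A's runs).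
def solveLoopA (a : List Int) (l r : Int) : Int :=
  if h : l ≤ r then
    let mid := PySem.Int.floordiv (l + r) 2
    have hb := PySem.Int.floordiv_two_mid_bounds h
    match PySem.List.pyGet? a mid with
    | some v => if v == mid then solveLoopA a (mid + 1) r else solveLoopA a l (mid - 1)
    | none => l  -- IndexError in Python; unreachable for A's initial bounds
  else l
termination_by (r + 1 - l).toNat
decreasing_by all_goals omega

def solve (a : List Int) : Int := solveLoopA a 0 (a.length - 1)

-- ===== PORT B =====
-- B's helper go(l, n): the window is the n consecutive indices starting at l;
-- structural descent on the count n. (n-1)//2 on the positive Python int n is Nat division.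
def solveGoB (a : List Int) (l : Int) (n : Nat) : Int :=
  match n with
  | 0 => l
  | Nat.succ m =>
    let k := m / 2
    let mid := l + (k : Int)
    match PySem.List.pyGet? a mid with
    | some v => if v == mid then solveGoB a (mid + 1) (m - k) else solveGoB a l k
    | none => l  -- IndexError in Python; unreachable for B's initial arguments
termination_by n
decreasing_by all_goals omega

def solve_alt (a : List Int) : Int := solveGoB a 0 a.length

-- ===== PRECONDITION & SPEC =====
def Spec_solve (a : List Int) (out : Int) : Prop := out = solve_alt a
instance (a : List Int) (out : Int) : Decidable (Spec_solve a out) := by unfold Spec_solve; infer_instance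

-- ===== CLAIM (what is proved, stated in full; the proofs are below) =====
def Claim_equal_solve : Prop := ∀ (a : List Int), Dom_solve a → Spec_solve a (solve a)

-- ===== LEMMAS AND PROOFS =====
-- A's midpoint (l+r)//2 equals B's l + (n-1)//2 where n = r+1-l is the window size.
theorem mid_eq (l r : Int) (m : Nat) (hm : r + 1 - l = (m : Int) + 1) :
    PySem.Int.floordiv (l + r) 2 = l + ((m / 2 : Nat) : Int) := by
  rw [PySem.Int.floordiv_eq_ediv_of_pos (by omega : (0:Int) < 2)]
  omega

theorem solveLoopA_eq_goB (a : List Int) (l r : Int) :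
    solveLoopA a l r = solveGoB a l (r + 1 - l).toNat := by
  induction l, r using solveLoopA.induct a with
  | case1 l r h mid hb v hv hveq ih =>
      obtain ⟨m, hm⟩ : ∃ m : Nat, r + 1 - l = (m : Int) + 1 := ⟨(r - l).toNat, by omega⟩
      have hmid : PySem.Int.floordiv (l + r) 2 = l + ((m / 2 : Nat) : Int) := mid_eq l r m hm
      have hv1 : PySem.List.pyGet? a (PySem.Int.floordiv (l + r) 2) = some v := hv
      have hveq1 : (v == PySem.Int.floordiv (l + r) 2) = true := hveq
      have ih1 : solveLoopA a (PySem.Int.floordiv (l + r) 2 + 1) r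
          = solveGoB a (PySem.Int.floordiv (l + r) 2 + 1)
            (r + 1 - (PySem.Int.floordiv (l + r) 2 + 1)).toNat := ih
      rw [hmid] at hv1 hveq1 ih1
      rw [solveLoopA, dif_pos h]
      rw [show (r + 1 - l).toNat = m + 1 by omega]
      rw [solveGoB]
      dsimp only
      rw [show PySem.List.pyGet? a (PySem.Int.floordiv (l + r) 2) = some v from hv]
      rw [hv1]
      dsimp only
      rw [if_pos (show (v == PySem.Int.floordiv (l + r) 2) = true from hveq), if_pos hveq1]
      rw [hmid, ih1]
      congr 1
      have hk : (m / 2 : Nat) ≤ m := Nat.div_le_self m 2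
      omega
  | case2 l r h mid hb v hv hvne ih =>
      obtain ⟨m, hm⟩ : ∃ m : Nat, r + 1 - l = (m : Int) + 1 := ⟨(r - l).toNat, by omega⟩
      have hmid : PySem.Int.floordiv (l + r) 2 = l + ((m / 2 : Nat) : Int) := mid_eq l r m hm
      have hv1 : PySem.List.pyGet? a (PySem.Int.floordiv (l + r) 2) = some v := hv
      have hvne1 : ¬(v == PySem.Int.floordiv (l + r) 2) = true := hvne
      have ih1 : solveLoopA a l (PySem.Int.floordiv (l + r) 2 - 1)
          = solveGoB a l (PySem.Int.floordiv (l + r) 2 - 1 + 1 - l).toNat := ih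
      rw [hmid] at hv1 hvne1 ih1
      rw [solveLoopA, dif_pos h]
      rw [show (r + 1 - l).toNat = m + 1 by omega]
      rw [solveGoB]
      dsimp only
      rw [show PySem.List.pyGet? a (PySem.Int.floordiv (l + r) 2) = some v from hv]
      rw [hv1]
      dsimp only
      rw [if_neg (show ¬(v == PySem.Int.floordiv (l + r) 2) = true from hvne), if_neg hvne1]
      rw [hmid, ih1]
      congr 1
      omega
  | case3 l r h mid hb hv =>
      obtain ⟨m, hm⟩ : ∃ m : Nat, r + 1 - l = (m : Int) + 1 := ⟨(r - l).toNat, by omega⟩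
      have hmid : PySem.Int.floordiv (l + r) 2 = l + ((m / 2 : Nat) : Int) := mid_eq l r m hm
      have hv1 : PySem.List.pyGet? a (PySem.Int.floordiv (l + r) 2) = none := hv
      rw [hmid] at hv1
      rw [solveLoopA, dif_pos h]
      rw [show (r + 1 - l).toNat = m + 1 by omega]
      rw [solveGoB]
      dsimp only
      rw [show PySem.List.pyGet? a (PySem.Int.floordiv (l + r) 2) = none from hv]
      rw [hv1]
  | case4 l r h =>
      rw [solveLoopA, dif_neg h]
      rw [show (r + 1 - l).toNat = 0 by omega]
      rw [solveGoB]

-- ===== VERDICT (by name: the statement is the Claim_ definition above) =====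
theorem solve_spec : Claim_equal_solve := by
  intro a _
  unfold Spec_solve solve solve_alt
  rw [solveLoopA_eq_goB]
  congr 1
  omega
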